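-- pv_equiv track=rewrite | github.com/huggin/gfg | stack_queue/reversing_equation.py | reverseEqn
-- ===== SOURCE A (Python) =====
-- def reverseEqn(s):
--     # code here
--     num = 0
--     stack = []
--     for c in s:
--         if c in ["+", "-", "*", "/"]:
--             stack.append(str(num))
--             num = 0
--             stack.append(c)
--         else:
--             num = num * 10 + ord(c) - ord("0")
--     stack.append(str(num))
--     return "".join(reversed(stack))
-- ===== SOURCE B (Python) =====
-- OPS = ("+", "-", "*", "/")
--
-- def reverseEqn(s):
--     # consume the characters right-to-left with a pop stack; each number is
--     # rebuilt by place value (digit * 10**k), so the output pieces come out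
--     # directly in final order and no reversal step is needed
--     rest = list(s)
--     parts = []
--     while True:
--         v = 0
--         p = 1
--         while rest and rest[-1] not in OPS:
--             v += (ord(rest.pop()) - 48) * p
--             p *= 10
--         parts.append(str(v))
--         if not rest:
--             return "".join(parts)
--         parts.append(rest.pop())
-- ===== Notes on version B (the rewrite author's own statement) =====
-- stated objective: alternative
-- what changed: B consumes the characters right-to-left with a pop stack, emits the output pieces directly in final order (no token list, no reversal step), and rebuilds each number by place value (digit*10^k from the least-significant end) instead of A's left-to-right Horner accumulation followed by a reversed join.
import Mathlib
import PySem

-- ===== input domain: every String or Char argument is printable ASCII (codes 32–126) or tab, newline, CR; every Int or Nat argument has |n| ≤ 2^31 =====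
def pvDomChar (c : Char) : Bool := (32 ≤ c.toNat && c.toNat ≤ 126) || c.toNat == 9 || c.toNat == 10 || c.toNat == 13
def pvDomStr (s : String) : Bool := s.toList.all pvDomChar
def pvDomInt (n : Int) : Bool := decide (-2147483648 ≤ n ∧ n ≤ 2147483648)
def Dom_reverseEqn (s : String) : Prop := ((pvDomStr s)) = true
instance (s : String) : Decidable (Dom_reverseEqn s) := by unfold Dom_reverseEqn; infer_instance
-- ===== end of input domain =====

-- B consumes the characters right-to-left with a pop stack, emitting the output pieces
-- directly in final order (no token reversal) and rebuilding numbers by place value;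
-- A scans left-to-right with Horner accumulation and joins the reversed stack (alternative, same cost).

-- ===== PORT A =====
-- the four operator characters, as the Python list ["+","-","*","/"] tests them
def pvOps : List Char := ['+', '-', '*', '/']

def reverseEqn (s : String) : String :=
  let st := s.toList.foldl
    (fun (st : Int × List String) c =>
      if c ∈ pvOps then
        (0, st.2 ++ [PySem.Int.toStr st.1] ++ [String.ofList [c]])
      else
        (st.1 * 10 + (c.toNat : Int) - 48, st.2))
    (0, [])
  PySem.Str.join "" (st.2 ++ [PySem.Int.toStr st.1]).reverse

-- ===== PORT B =====
-- B's inner while loop: pop digits off the stack top, accumulating by place value p;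
-- the stack `rest` is held top-first (the reversed remaining input), so pop = head
def pvNumPop : List Char → Int → Int → Int × List Char
  | [], v, _ => (v, [])
  | c :: rest, v, p =>
      if c ∈ pvOps then (v, c :: rest)
      else pvNumPop rest (v + ((c.toNat : Int) - 48) * p) (p * 10)

theorem pvNumPop_len_le : ∀ (cs : List Char) (v p : Int), (pvNumPop cs v p).2.length ≤ cs.length
  | [], _, _ => by simp [pvNumPop]
  | c :: rest, v, p => by
    by_cases h : c ∈ pvOps
    · simp [pvNumPop, h]
    · simp only [pvNumPop, if_neg h]
      exact le_trans (pvNumPop_len_le rest _ _) (Nat.le_succ _)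

-- B's outer while loop: emit the number, stop if the stack is empty, else pop the operator
def pvOuter (rrest : List Char) (parts : List String) : List String :=
  let r := pvNumPop rrest 0 1
  let parts' := parts ++ [PySem.Int.toStr r.1]
  match h : r.2 with
  | [] => parts'
  | c :: rest' =>
      pvOuter rest' (parts' ++ [String.ofList [c]])
termination_by rrest.length
decreasing_by
  have := pvNumPop_len_le rrest 0 1
  rw [h] at this
  simpa using Nat.lt_of_lt_of_le (Nat.lt_succ_self _) this

def reverseEqn_alt (s : String) : String :=
  PySem.Str.join "" (pvOuter s.toList.reverse [])

-- ===== PRECONDITION & SPEC =====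
def Spec_reverseEqn (s : String) (out : String) : Prop := out = reverseEqn_alt s
instance (s : String) (out : String) : Decidable (Spec_reverseEqn s out) := by unfold Spec_reverseEqn; infer_instance

-- ===== CLAIM (what is proved, stated in full; the proofs are below) =====
def Claim_equal_reverseEqn : Prop := ∀ (s : String), Dom_reverseEqn s → Spec_reverseEqn s (reverseEqn s)

-- ===== LEMMAS AND PROOFS =====

-- A's loop body
def pvAStep (st : Int × List String) (c : Char) : Int × List String :=
  if c ∈ pvOps then
    (0, st.2 ++ [PySem.Int.toStr st.1] ++ [String.ofList [c]])
  else
    (st.1 * 10 + (c.toNat : Int) - 48, st.2)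

-- Horner value of a digit field (A's accumulation from n)
def pvHorner (n : Int) (cs : List Char) : Int :=
  cs.foldl (fun v c => v * 10 + (c.toNat : Int) - 48) n

-- place value of a reversed digit field (B's accumulation)
def pvRVal : List Char → Int
  | [] => 0
  | c :: u => ((c.toNat : Int) - 48) + 10 * pvRVal u

theorem pvHorner_shift (cs : List Char) : ∀ n : Int, pvHorner n cs = n * 10 ^ cs.length + pvHorner 0 cs := by
  induction cs with
  | nil => intro n; simp [pvHorner]
  | cons c cs ih =>
    intro n
    simp only [pvHorner, List.foldl_cons] at *
    rw [ih (n * 10 + (c.toNat : Int) - 48), ih ((0:Int) * 10 + (c.toNat : Int) - 48)]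
    simp [List.length_cons]
    ring

theorem pvRVal_reverse (t : List Char) : pvRVal t.reverse = pvHorner 0 t := by
  induction t with
  | nil => simp [pvRVal, pvHorner]
  | cons c t ih =>
    have hap : ∀ (u : List Char) (a : Char), pvRVal (u ++ [a]) = pvRVal u + ((a.toNat : Int) - 48) * 10 ^ u.length := by
      intro u a
      induction u with
      | nil => simp [pvRVal]
      | cons b u ihu => simp [pvRVal, ihu, pow_succ]; ring
    have : pvHorner 0 (c :: t) = ((c.toNat : Int) - 48) * 10 ^ t.length + pvHorner 0 t := by
      simp only [pvHorner, List.foldl_cons]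
      have := pvHorner_shift t ((0:Int) * 10 + (c.toNat : Int) - 48)
      simpa [pvHorner] using this
    simp only [List.reverse_cons, hap, ih, this, List.length_reverse]
    ring

-- consuming a non-operator block through pvNumPop
theorem pvNumPop_append (u : List Char) (hu : ∀ c ∈ u, c ∉ pvOps) :
    ∀ (r : List Char) (v p : Int), pvNumPop (u ++ r) v p = pvNumPop r (v + pvRVal u * p) (p * 10 ^ u.length) := by
  induction u with
  | nil => intro r v p; simp [pvRVal]
  | cons c u ih =>
    intro r v p
    have hc : c ∉ pvOps := hu c (by simp)
    simp only [List.cons_append, pvNumPop, if_neg hc]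
    rw [ih (fun d hd => hu d (by simp [hd])) r]
    congr 1
    · simp [pvRVal]; ring
    · simp [pow_succ]; ring
theorem pvNumPop_stop : ∀ (r : List Char) (v p : Int), (r = [] ∨ ∃ c r', r = c :: r' ∧ c ∈ pvOps) → pvNumPop r v p = (v, r) := by
  rintro r v p (rfl | ⟨c, r', rfl, hc⟩) <;> simp [pvNumPop, *]

-- A's fold over a non-operator block: stack unchanged, Horner accumulation
theorem pvAFold_noop (u : List Char) (hu : ∀ c ∈ u, c ∉ pvOps) :
    ∀ (n : Int) (st : List String), u.foldl pvAStep (n, st) = (pvHorner n u, st) := by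
  induction u with
  | nil => intro n st; simp [pvHorner]
  | cons c u ih =>
    intro n st
    have hc : c ∉ pvOps := hu c (by simp)
    simp only [List.foldl_cons, pvAStep, if_neg hc]
    rw [ih (fun d hd => hu d (by simp [hd]))]
    simp [pvHorner]

-- unfolding pvOuter one round
theorem pvOuter_eq_nil (rrest : List Char) (h : (pvNumPop rrest 0 1).2 = []) (parts : List String) :
    pvOuter rrest parts = parts ++ [PySem.Int.toStr (pvNumPop rrest 0 1).1] := by
  rw [pvOuter]
  split <;> simp_all

theorem pvOuter_eq_cons (rrest : List Char) (c : Char) (rest' : List Char)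
    (h : (pvNumPop rrest 0 1).2 = c :: rest') (parts : List String) :
    pvOuter rrest parts = pvOuter rest' (parts ++ [PySem.Int.toStr (pvNumPop rrest 0 1).1] ++ [String.ofList [c]]) := by
  rw [pvOuter]
  split
  · simp_all
  · rename_i c2 rest2 heq
    rw [h] at heq
    cases heq
    simp

-- pvOuter's accumulator distributes
theorem pvOuter_acc (n : Nat) : ∀ (r : List Char), r.length ≤ n → ∀ (acc : List String), pvOuter r acc = acc ++ pvOuter r [] := by
  induction n with
  | zero =>
    intro r hr acc
    have : r = [] := List.length_eq_zero_iff.mp (Nat.le_zero.mp hr)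
    subst this
    rw [pvOuter_eq_nil [] (by simp [pvNumPop]), pvOuter_eq_nil [] (by simp [pvNumPop])]
    simp
  | succ n ih =>
    intro r hr acc
    rcases h : (pvNumPop r 0 1).2 with _ | ⟨c, rest'⟩
    · rw [pvOuter_eq_nil r h, pvOuter_eq_nil r h]
      simp
    · have hlen : rest'.length ≤ n := by
        have := pvNumPop_len_le r 0 1
        rw [h] at this
        simp at this
        omega
      rw [pvOuter_eq_cons r c rest' h, pvOuter_eq_cons r c rest' h,
          ih rest' hlen (acc ++ [PySem.Int.toStr (pvNumPop r 0 1).1] ++ [String.ofList [c]]),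
          ih rest' hlen ([] ++ [PySem.Int.toStr (pvNumPop r 0 1).1] ++ [String.ofList [c]])]
      simp

-- the key correspondence: A's reversed token list is B's output list
theorem pv_main (n : Nat) : ∀ (cs : List Char), cs.length ≤ n →
    ((cs.foldl pvAStep (0, [])).2 ++ [PySem.Int.toStr (cs.foldl pvAStep (0, [])).1]).reverse
      = pvOuter cs.reverse [] := by
  induction n with
  | zero =>
    intro cs hcs
    have : cs = [] := List.length_eq_zero_iff.mp (Nat.le_zero.mp hcs)
    subst this
    rw [pvOuter]
    simp [pvNumPop]
  | succ n ih =>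
    intro cs hcs
    set u := cs.reverse.takeWhile (fun c => !(decide (c ∈ pvOps))) with hu_def
    set r := cs.reverse.dropWhile (fun c => !(decide (c ∈ pvOps))) with hr_def
    have hsplit : cs.reverse = u ++ r := (List.takeWhile_append_dropWhile).symm
    have hu : ∀ c ∈ u, c ∉ pvOps := by
      intro c hc
      have := List.mem_takeWhile_imp (hu_def ▸ hc)
      simpa using this
    rcases hr : r with _ | ⟨c, r'⟩
    · -- no operator in cs: single number
      have hrev : cs.reverse = u := by rw [hsplit, hr]; simp
      have hcs_all : ∀ c ∈ cs, c ∉ pvOps := by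
        intro c hc
        exact hu c (hrev ▸ List.mem_reverse.mpr hc)
      rw [pvAFold_noop cs hcs_all 0 []]
      have hpop : pvNumPop cs.reverse 0 1 = (pvRVal u, []) := by
        rw [hrev, ← List.append_nil u, pvNumPop_append u hu]
        simp [pvNumPop]
      rw [pvOuter_eq_nil cs.reverse (by rw [hpop]), hpop]
      have : pvRVal u = pvHorner 0 cs := by
        rw [← hrev, pvRVal_reverse]
      simp [this]
    · -- cs = r'.reverse ++ [c] ++ u.reverse with c the last operator
      have hc : c ∈ pvOps := by
        have := List.head_dropWhile_not (p := fun c => !(decide (c ∈ pvOps))) (l := cs.reverse)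
        rw [← hr_def, hr] at this
        simpa using this (by simp)
      have hcs_eq : cs = r'.reverse ++ [c] ++ u.reverse := by
        have : cs.reverse.reverse = (u ++ c :: r').reverse := by rw [hsplit, hr]
        simpa using this
      have hlen : r'.reverse.length ≤ n := by
        have h1 : cs.length = r'.length + 1 + u.length := by
          have := congrArg List.length hcs_eq
          simp at this
          omega
        simp
        omega
      -- A's fold, split at the last operator
      have hAfold : cs.foldl pvAStep (0, []) =
          (pvHorner 0 u.reverse,
            (r'.reverse.foldl pvAStep (0, [])).2
              ++ [PySem.Int.toStr (r'.reverse.foldl pvAStep (0, [])).1]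
              ++ [String.ofList [c]]) := by
        rw [hcs_eq, List.foldl_append, List.foldl_append]
        rw [show ([c].foldl pvAStep (r'.reverse.foldl pvAStep (0, []))) =
            (0, (r'.reverse.foldl pvAStep (0, [])).2
              ++ [PySem.Int.toStr (r'.reverse.foldl pvAStep (0, [])).1]
              ++ [String.ofList [c]]) by simp [pvAStep, hc]]
        rw [pvAFold_noop u.reverse (fun d hd => hu d (by simpa using hd)) 0]
      -- B's outer loop, one round
      have hBstep : pvOuter cs.reverse [] =
          [PySem.Int.toStr (pvHorner 0 u.reverse), String.ofList [c]] ++ pvOuter r' [] := by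
        have hpop : pvNumPop cs.reverse 0 1 = (pvHorner 0 u.reverse, c :: r') := by
          rw [hsplit, hr, pvNumPop_append u hu, pvNumPop_stop _ _ _ (Or.inr ⟨c, r', rfl, hc⟩)]
          congr 1
          rw [← pvRVal_reverse]
          simp
        rw [pvOuter_eq_cons cs.reverse c r' (by rw [hpop]), hpop,
            pvOuter_acc r'.length r' le_rfl]
        simp
      rw [hAfold, hBstep]
      have hIH := ih r'.reverse hlen
      simp only [List.reverse_reverse] at hIH
      rw [← hIH]
      simp

-- ===== VERDICT (by name: the statement is the Claim_ definition above) =====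
theorem reverseEqn_spec : Claim_equal_reverseEqn := by
  intro s _
  unfold Spec_reverseEqn reverseEqn reverseEqn_alt
  have := pv_main s.toList.length s.toList le_rfl
  simp only [← this]
  rfl
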